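-- pv_equiv track=rewrite | github.com/epn-vespa/FacilityList | src/utils/acronymous.py | del_numbers
-- ===== SOURCE A (Python) =====
-- def del_numbers(acronym: str) -> str:
--     """
--     Get a version of the acronym with multiplied letters (ex: DA2I => DAII)
--     """
--     number = 0
--     res = ""
--     for letter in acronym:
--         if letter.isnumeric():
--             number = number * 10 + int(letter)
--         elif letter.isalpha():
--             if number > 0 and number < 10:
--                 res += letter * number
--             elif number >= 10:
--                 res += str(number) + letter
--             else:
--                 res += letter
--             number = 0
--         else:
--             number = 0
--             res += letter
--     return res
-- ===== SOURCE B (Python) =====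
-- def del_numbers(acronym: str) -> str:
--     """
--     Tokenize-then-expand: group the string into maximal digit runs and single
--     other chars, then expand each digit run onto the following letter (if any).
--     """
--     out = []
--     i, n = 0, len(acronym)
--     while i < n:
--         if acronym[i].isnumeric():
--             j = i
--             while j < n and acronym[j].isnumeric():
--                 j += 1
--             # value of the run, per-char as in the original semantics
--             num = 0
--             for d in acronym[i:j]:
--                 num = num * 10 + int(d)
--             if j < n and acronym[j].isalpha():
--                 letter = acronym[j]
--                 if 0 < num < 10:
--                     out.append(letter * num)
--                 elif num >= 10:
--                     out.append(str(num) + letter)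
--                 else:
--                     out.append(letter)
--                 j += 1
--             # a digit run not followed by a letter is dropped
--             i = j
--         else:
--             out.append(acronym[i])
--             i += 1
--     return "".join(out)
-- ===== Notes on version B (the rewrite author's own statement) =====
-- stated objective: alternative
-- what changed: Replaced the incremental state-machine scanner (carrying a pending number across every iteration) by a tokenize-then-expand pass: maximal digit runs are grouped first and each run is applied to the single following letter, everything else is copied verbatim.
import Mathlib
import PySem

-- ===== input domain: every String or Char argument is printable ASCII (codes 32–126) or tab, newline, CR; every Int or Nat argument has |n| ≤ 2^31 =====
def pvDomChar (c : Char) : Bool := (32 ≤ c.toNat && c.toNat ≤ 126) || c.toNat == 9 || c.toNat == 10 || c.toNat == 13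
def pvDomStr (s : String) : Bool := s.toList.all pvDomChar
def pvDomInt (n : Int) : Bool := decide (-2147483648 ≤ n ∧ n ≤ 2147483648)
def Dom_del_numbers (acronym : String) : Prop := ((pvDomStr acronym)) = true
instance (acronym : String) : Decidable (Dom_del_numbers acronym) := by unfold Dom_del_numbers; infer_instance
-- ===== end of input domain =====

-- B re-implements the incremental scanner as a tokenize-then-expand pass (same return values; objective: alternative/idiomatic).

-- shared char-level predicates: Python's c.isnumeric()/c.isalpha() on the ASCII domain
def pyIsNum (c : Char) : Bool := PySem.Chars.strIsdigit [c]
def pyIsAlpha (c : Char) : Bool := PySem.Chars.strIsalpha [c]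
-- int(c) for an ASCII digit char
def digVal (c : Char) : Int := (c.toNat : Int) - 48

-- ===== PORT A =====
-- A's single loop over the characters with state (number, res)
def delA_loop : List Char → Int → List Char → List Char
  | [], _, res => res
  | c :: rest, number, res =>
    if pyIsNum c then
      delA_loop rest (number * 10 + digVal c) res
    else if pyIsAlpha c then
      delA_loop rest 0
        (if number > 0 ∧ number < 10 then res ++ List.replicate number.toNat c
         else if number ≥ 10 then res ++ PySem.Int.toChars number ++ [c]
         else res ++ [c])
    else
      delA_loop rest 0 (res ++ [c])

def del_numbers (acronym : String) : String :=
  String.ofList (delA_loop acronym.toList 0 [])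

-- ===== PORT B =====
-- num = 0; for d in run: num = num*10 + int(d)
def runVal (ds : List Char) : Int := ds.foldl (fun a d => a * 10 + digVal d) 0

-- B: group a maximal digit run, apply it to the following letter (if any), else copy
def delB : List Char → List Char
  | [] => []
  | c :: rest =>
    if pyIsNum c then
      let ds := (c :: rest).takeWhile pyIsNum
      let num := runVal ds
      match hdw : rest.dropWhile pyIsNum with
      | [] => []
      | a :: tl =>
        if pyIsAlpha a then
          (if 0 < num ∧ num < 10 then List.replicate num.toNat a
           else if num ≥ 10 then PySem.Int.toChars num ++ [a]
           else [a]) ++ delB tl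
        else a :: delB tl
    else
      c :: delB rest
termination_by l => l.length
decreasing_by
  · have h1 : (rest.dropWhile pyIsNum).length ≤ rest.length := rest.length_dropWhile_le pyIsNum
    rw [hdw] at h1; simp at h1 ⊢; omega
  · have h1 : (rest.dropWhile pyIsNum).length ≤ rest.length := rest.length_dropWhile_le pyIsNum
    rw [hdw] at h1; simp at h1 ⊢; omega
  · simp

def del_numbers_alt (acronym : String) : String :=
  String.ofList (delB acronym.toList)

-- ===== PRECONDITION & SPEC =====
def Spec_del_numbers (acronym : String) (out : String) : Prop := out = del_numbers_alt acronym
instance (acronym : String) (out : String) : Decidable (Spec_del_numbers acronym out) := by unfold Spec_del_numbers; infer_instance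

-- ===== CLAIM (what is proved, stated in full; the proofs are below) =====
def Claim_equal_del_numbers : Prop := ∀ (acronym : String), Dom_del_numbers acronym → Spec_del_numbers acronym (del_numbers acronym)

-- ===== LEMMAS AND PROOFS =====

-- A's loop with a pending number n: it swallows the digit run, then emits on the next char
theorem delA_run (l : List Char) : ∀ (n : Int) (res : List Char),
    delA_loop l n res =
      match l.dropWhile pyIsNum with
      | [] => res
      | a :: tl =>
        let n' := (l.takeWhile pyIsNum).foldl (fun a d => a * 10 + digVal d) n
        if pyIsAlpha a then
          delA_loop tl 0
            (if n' > 0 ∧ n' < 10 then res ++ List.replicate n'.toNat a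
             else if n' ≥ 10 then res ++ PySem.Int.toChars n' ++ [a]
             else res ++ [a])
        else delA_loop tl 0 (res ++ [a]) := by
  induction l with
  | nil => intro n res; simp [delA_loop]
  | cons c rest ih =>
    intro n res
    by_cases hc : pyIsNum c = true
    · simp only [delA_loop, hc, if_pos, List.dropWhile_cons, List.takeWhile_cons, List.foldl_cons]
      exact ih (n * 10 + digVal c) res
    · simp only [delA_loop, List.dropWhile_cons, List.takeWhile_cons, hc]
      by_cases ha : pyIsAlpha c = true <;> simp [ha]

-- main invariant: A's loop with number = 0 appends exactly delB
theorem delA_eq_delB (l : List Char) : ∀ (res : List Char),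
    delA_loop l 0 res = res ++ delB l := by
  induction hL : l.length using Nat.strong_induction_on generalizing l with
  | _ N ih =>
  intro res
  match l with
  | [] => simp [delA_loop, delB]
  | c :: rest =>
    by_cases hc : pyIsNum c = true
    · rw [delA_run, delB]
      simp only [hc, if_pos, List.dropWhile_cons, List.takeWhile_cons, List.foldl_cons,
        Int.zero_mul, Int.zero_add]
      have hlen : (rest.dropWhile pyIsNum).length ≤ rest.length :=
        rest.length_dropWhile_le pyIsNum
      match hdrop : rest.dropWhile pyIsNum with
      | [] => simp
      | a :: tl =>
        rw [hdrop] at hlen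
        have htl : tl.length < N := by subst hL; simp at hlen ⊢; omega
        by_cases ha : pyIsAlpha a = true
        · simp only [ha, if_pos, runVal, List.foldl_cons, Int.zero_mul, Int.zero_add]
          rw [ih tl.length htl tl rfl]
          split_ifs <;> simp
        · simp only [ha, if_neg, Bool.not_eq_true]
          rw [ih tl.length htl tl rfl]
          simp
    · have hrest : rest.length < N := by subst hL; simp
      rw [delB]
      simp only [hc]
      by_cases ha : pyIsAlpha c = true
      · simp only [delA_loop, hc, ha, if_pos]
        rw [ih rest.length hrest rest rfl]
        simp
      · have hi := ih rest.length hrest rest rfl (res ++ [c])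
        simp [delA_loop, hc, ha, hi]

-- ===== VERDICT (by name: the statement is the Claim_ definition above) =====
theorem del_numbers_spec : Claim_equal_del_numbers := by
  intro acronym _
  unfold Spec_del_numbers del_numbers del_numbers_alt
  rw [delA_eq_delB]
  simp
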